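-- pv_equiv track=rewrite | github.com/sajjad2881/NewSyntopicon | Code/script.py | map_book_new
-- ===== SOURCE A (Python) =====
-- def map_book_new(hash_map, tokens):
--     hash_map_current = {}
--     if tokens is not None:
--         for element in tokens:
--             # Remove Punctuation
--             word = element.replace(",","")
--             word = word.replace(".","")
--             word = word.replace("?","")
--             word = word.replace("\"","")
--             word = word.replace("/'","")
--             word = word.replace("\"","")
--             word = word.replace("!","")
--             word = word.replace(":"," ")
--             word = word.replace("*"," ")
--             word = word.replace(";"," ")
--             word = word.replace("(","")
--             word = word.replace("_","")
--             word = word.replace(")","")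
--             word = word.replace("'","")
--             word = word.replace(" ","")
--             sep1 = '['
--             word = word.split(sep1, 1)[0]
--             sep2 = ']'
--             word = word.split(sep2, 1)[0]
--             sep3 = '-'
--             word = word.split(sep3, 1)[0]
--             word = word.lower()
--
--             if word in hash_map and word in hash_map_current:
--                 hash_map[word] = [hash_map[word][0] + 1, hash_map[word][1]]
--             elif word in hash_map:
--                 hash_map_current[word] = [1,1]
--                 hash_map[word] = [hash_map[word][0] + 1, hash_map[word][1] + 1]
--             else:
--                 hash_map_current[word] = [1,1]
--                 hash_map[word] = [1, 1]
--         return hash_map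
--     else:
--         return None
-- ===== SOURCE B (Python) =====
-- # Two-pass rewrite: build a local frequency table of cleaned words, then merge it
-- # into hash_map once per distinct word. Mutates hash_map in place like the original.
-- def _clean(element):
--     word = element.replace(",","")
--     word = word.replace(".","")
--     word = word.replace("?","")
--     word = word.replace("\"","")
--     word = word.replace("/'","")
--     word = word.replace("\"","")
--     word = word.replace("!","")
--     word = word.replace(":"," ")
--     word = word.replace("*"," ")
--     word = word.replace(";"," ")
--     word = word.replace("(","")
--     word = word.replace("_","")
--     word = word.replace(")","")
--     word = word.replace("'","")
--     word = word.replace(" ","")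
--     word = word.split('[', 1)[0]
--     word = word.split(']', 1)[0]
--     word = word.split('-', 1)[0]
--     return word.lower()
--
-- def map_book_new(hash_map, tokens):
--     if tokens is None:
--         return None
--     words = [_clean(element) for element in tokens]
--     counts = {}
--     for w in words:
--         counts[w] = counts.get(w, 0) + 1
--     for w, c in counts.items():
--         if w in hash_map:
--             hash_map[w] = [hash_map[w][0] + c, hash_map[w][1] + 1]
--         else:
--             hash_map[w] = [c, 1]
--     return hash_map
-- ===== Notes on version B (the rewrite author's own statement) =====
-- stated objective: simpler
-- what changed: B drops A's hash_map_current dict and its three-way per-token branch: it cleans the tokens, builds a local frequency table in one pass, then merges each distinct cleaned word into hash_map exactly once (count added in bulk, document count bumped once).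
import Mathlib
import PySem

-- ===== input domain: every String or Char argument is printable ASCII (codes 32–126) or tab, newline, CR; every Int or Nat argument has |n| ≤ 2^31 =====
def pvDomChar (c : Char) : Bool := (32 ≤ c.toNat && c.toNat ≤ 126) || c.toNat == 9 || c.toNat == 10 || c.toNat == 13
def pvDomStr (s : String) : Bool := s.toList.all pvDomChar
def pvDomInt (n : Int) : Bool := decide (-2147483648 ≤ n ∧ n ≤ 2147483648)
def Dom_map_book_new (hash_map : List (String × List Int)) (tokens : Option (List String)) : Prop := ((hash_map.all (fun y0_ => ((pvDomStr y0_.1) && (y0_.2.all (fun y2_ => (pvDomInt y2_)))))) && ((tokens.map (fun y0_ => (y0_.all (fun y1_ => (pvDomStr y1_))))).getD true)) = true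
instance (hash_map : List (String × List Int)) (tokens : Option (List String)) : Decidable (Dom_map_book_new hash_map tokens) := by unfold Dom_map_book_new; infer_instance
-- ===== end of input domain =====

-- B replaces A's per-token three-way update (threading a `hash_map_current` dict) by two passes:
-- a local frequency table of the cleaned words, then one merge per DISTINCT word into hash_map.
-- Both Pythons mutate hash_map in place and return it; the equivalence proved here is about the return value.

-- ===== PORT A =====
-- shared helper: `word.split(sep, 1)[0]` (sep a nonempty literal, so splitMax? is `some` and the list nonempty;
-- the `| _ => s` fallback is unreachable)
def pvCut (s : String) (sep : String) : String :=
  match PySem.Str.splitMax? s sep 1 with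
  | some (p :: _) => p
  | _ => s

-- shared helper: the cleaning chain of both Pythons, verbatim
def pvClean (element : String) : String :=
  let w := PySem.Str.replace element "," ""
  let w := PySem.Str.replace w "." ""
  let w := PySem.Str.replace w "?" ""
  let w := PySem.Str.replace w "\"" ""
  let w := PySem.Str.replace w "/'" ""
  let w := PySem.Str.replace w "\"" ""
  let w := PySem.Str.replace w "!" ""
  let w := PySem.Str.replace w ":" " "
  let w := PySem.Str.replace w "*" " "
  let w := PySem.Str.replace w ";" " "
  let w := PySem.Str.replace w "(" ""
  let w := PySem.Str.replace w "_" ""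
  let w := PySem.Str.replace w ")" ""
  let w := PySem.Str.replace w "'" ""
  let w := PySem.Str.replace w " " ""
  let w := pvCut w "["
  let w := pvCut w "]"
  let w := pvCut w "-"
  PySem.Str.lower w

-- A's loop body on the already-cleaned word (value reads use getD defaults; Pre_ excludes the inputs
-- where the Python indexing `hash_map[word][0/1]` would raise, so this is exact on Pre_)
def pvStepAW (st : PySem.Dict String (List Int) × PySem.Dict String (List Int)) (w : String) :
    PySem.Dict String (List Int) × PySem.Dict String (List Int) :=
  let hm := st.1
  let cur := st.2
  if hm.contains w && cur.contains w then
    (hm.insert w [(hm.getD w []).getD 0 0 + 1, (hm.getD w []).getD 1 0], cur)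
  else if hm.contains w then
    (hm.insert w [(hm.getD w []).getD 0 0 + 1, (hm.getD w []).getD 1 0 + 1], cur.insert w [1, 1])
  else
    (hm.insert w [1, 1], cur.insert w [1, 1])

-- A's loop body on a raw token: clean, then update
def pvStepA (st : PySem.Dict String (List Int) × PySem.Dict String (List Int)) (element : String) :
    PySem.Dict String (List Int) × PySem.Dict String (List Int) :=
  pvStepAW st (pvClean element)

def map_book_new (hash_map : List (String × List Int)) (tokens : Option (List String)) : Option (List (String × List Int)) :=
  match tokens with
  | some ts => some ((ts.foldl pvStepA (PySem.Dict.mk hash_map, (PySem.Dict.empty : PySem.Dict String (List Int)))).1.items)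
  | none => none

-- ===== PORT B =====
-- B's merge step for one distinct cleaned word with its count
def pvStepB (h : PySem.Dict String (List Int)) (p : String × Int) : PySem.Dict String (List Int) :=
  if h.contains p.1 then
    h.insert p.1 [(h.getD p.1 []).getD 0 0 + p.2, (h.getD p.1 []).getD 1 0 + 1]
  else
    h.insert p.1 [p.2, 1]

def map_book_new_alt (hash_map : List (String × List Int)) (tokens : Option (List String)) : Option (List (String × List Int)) :=
  match tokens with
  | none => none
  | some ts =>
    let words := ts.map pvClean
    let counts := words.foldl (fun d w => d.insert w (d.getD w 0 + 1)) (PySem.Dict.empty : PySem.Dict String Int)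
    some ((counts.items.foldl pvStepB (PySem.Dict.mk hash_map)).items)

-- ===== PRECONDITION & SPEC =====
-- Pre_ excludes (i) hash_map association lists with duplicate keys, which do not represent any Python
-- dict (the harness' dict has last-wins semantics there while the assoc-list encoding looks up the first
-- match), and (ii) inputs where some pre-existing entry whose value list is shorter than 2 is hit by a
-- cleaned token — there the Python A (and B) raise IndexError on `hash_map[word][0]`/`[1]`.
def Pre_map_book_new (hash_map : List (String × List Int)) (tokens : Option (List String)) : Prop :=
  match tokens with
  | none => True
  | some ts =>
    (hash_map.map Prod.fst).Nodup ∧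
    ∀ p ∈ hash_map, p.2.length < 2 → p.1 ∉ ts.map pvClean
instance (hash_map : List (String × List Int)) (tokens : Option (List String)) : Decidable (Pre_map_book_new hash_map tokens) := by unfold Pre_map_book_new; cases tokens <;> infer_instance

def pvWitness_map_book_new : (List (String × List Int)) × Option (List String) :=
  ([("the", [2, 1])], some ["The!", "cat", "the"])

def Spec_map_book_new (hash_map : List (String × List Int)) (tokens : Option (List String)) (out : Option (List (String × List Int))) : Prop := out = map_book_new_alt hash_map tokens
instance (hash_map : List (String × List Int)) (tokens : Option (List String)) (out : Option (List (String × List Int))) : Decidable (Spec_map_book_new hash_map tokens out) := by unfold Spec_map_book_new; infer_instance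

-- ===== CLAIM (what is proved, stated in full; the proofs are below) =====
def Claim_equal_map_book_new : Prop := ∀ (hash_map : List (String × List Int)) (tokens : Option (List String)), Dom_map_book_new hash_map tokens → Pre_map_book_new hash_map tokens → Spec_map_book_new hash_map tokens (map_book_new hash_map tokens)

-- ===== LEMMAS AND PROOFS =====

-- B's merge step, made aware of A's `hash_map_current` membership: on words already current,
-- A's later occurrences never bump the document count.  With `cur = empty` this IS pvStepB.
def pvStepC (cur : PySem.Dict String (List Int)) (h : PySem.Dict String (List Int)) (p : String × Int) : PySem.Dict String (List Int) :=
  if cur.contains p.1 then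
    h.insert p.1 [(h.getD p.1 []).getD 0 0 + p.2, (h.getD p.1 []).getD 1 0]
  else
    pvStepB h p

lemma pvStepC_empty : pvStepC (PySem.Dict.empty : PySem.Dict String (List Int)) = pvStepB := by
  funext h p
  simp [pvStepC, PySem.Dict.contains_empty]

-- two inserts at distinct keys commute when the first key is already present (its insert is an
-- in-place overwrite, so the items order is unaffected)
lemma pvInsert_comm (d : PySem.Dict String (List Int)) {w q : String} (hne : q ≠ w)
    (hw : d.contains w = true) (a b : List Int) :
    (d.insert w a).insert q b = (d.insert q b).insert w a := by
  have hqw : (q == w) = false := by simp [hne]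
  have hwq : (w == q) = false := by simp [Ne.symm hne]
  apply PySem.Dict.ext
  by_cases hq : d.contains q = true
  · have h1 : (d.insert w a).contains q = true := by
      rw [PySem.Dict.contains_insert]; simp [hq]
    have h2 : (d.insert q b).contains w = true := by
      rw [PySem.Dict.contains_insert]; simp [hw]
    rw [PySem.Dict.items_insert, if_pos h1, PySem.Dict.items_insert, if_pos hw,
        PySem.Dict.items_insert, if_pos h2, PySem.Dict.items_insert, if_pos hq,
        List.map_map, List.map_map]
    apply List.map_congr_left
    intro p _
    by_cases hpw : (p.1 == w) = true
    · simp [Function.comp, (by simpa using hpw : p.1 = w), Ne.symm hne]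
    · by_cases hpq : (p.1 == q) = true
      · simp [Function.comp, (by simpa using hpq : p.1 = q), hne]
      · simp [Function.comp, hpw, hpq]
  · have h1 : (d.insert w a).contains q = false := by
      rw [PySem.Dict.contains_insert]; simp [hq, hqw]
    have h2 : (d.insert q b).contains w = true := by
      rw [PySem.Dict.contains_insert]; simp [hw]
    rw [PySem.Dict.items_insert, if_neg (by simp [h1]), PySem.Dict.items_insert, if_pos hw,
        PySem.Dict.items_insert, if_pos h2, PySem.Dict.items_insert, if_neg (by simp [hq]),
        List.map_append]
    simp [hne]

-- reads at w pass through a pvStepC update at a different key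
lemma pvStepC_getD_of_ne (cur h : PySem.Dict String (List Int)) (p : String × Int) {w : String}
    (hne : p.1 ≠ w) : (pvStepC cur h p).getD w [] = h.getD w [] := by
  have h : w ≠ p.1 := Ne.symm hne
  unfold pvStepC pvStepB
  split_ifs <;> exact PySem.Dict.getD_insert_of_ne _ _ _ h

lemma pvStepC_contains_of_ne (cur h : PySem.Dict String (List Int)) (p : String × Int) {w : String}
    (hne : p.1 ≠ w) : (pvStepC cur h p).contains w = h.contains w := by
  have h : (w == p.1) = false := by simp [Ne.symm hne]
  unfold pvStepC pvStepB
  split_ifs <;> rw [PySem.Dict.contains_insert] <;> simp [h]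

-- an overwrite at w commutes with a pvStepC-fold over pairs whose keys avoid w
lemma pvFold_insert_comm (cur : PySem.Dict String (List Int)) {w : String} (Q : List (String × Int))
    (hQ : ∀ p ∈ Q, p.1 ≠ w) :
    ∀ (h : PySem.Dict String (List Int)) (v : List Int), h.contains w = true →
      Q.foldl (pvStepC cur) (h.insert w v) = (Q.foldl (pvStepC cur) h).insert w v := by
  induction Q with
  | nil => intro h v hw; rfl
  | cons q Q IH =>
    intro h v hw
    have hq : q.1 ≠ w := hQ q (List.mem_cons_self)
    have hswap : pvStepC cur (h.insert w v) q = (pvStepC cur h q).insert w v := by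
      unfold pvStepC pvStepB
      rw [PySem.Dict.getD_insert_of_ne _ _ _ hq]
      rw [PySem.Dict.contains_insert]
      simp only [show (q.1 == w) = false by simp [hq], Bool.false_or]
      split_ifs <;> exact pvInsert_comm h hq hw v _
    rw [List.foldl_cons, List.foldl_cons, hswap]
    exact IH (fun p hp => hQ p (List.mem_cons_of_mem _ hp)) _ v
      (by rw [pvStepC_contains_of_ne cur h q hq]; exact hw)

lemma pvFold_getD (cur : PySem.Dict String (List Int)) {w : String} (Q : List (String × Int))
    (hQ : ∀ p ∈ Q, p.1 ≠ w) (h : PySem.Dict String (List Int)) :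
    (Q.foldl (pvStepC cur) h).getD w [] = h.getD w [] := by
  induction Q generalizing h with
  | nil => rfl
  | cons q Q IH =>
    rw [List.foldl_cons, IH (fun p hp => hQ p (List.mem_cons_of_mem _ hp))]
    exact pvStepC_getD_of_ne cur h q (hQ q (List.mem_cons_self))

-- keys of the threaded pair after A's loop
lemma pvCur_contains (ws : List String) (hm cur : PySem.Dict String (List Int)) (k : String) :
    (ws.foldl pvStepAW (hm, cur)).2.contains k = (cur.contains k || decide (k ∈ ws)) := by
  induction ws generalizing hm cur with
  | nil => simp
  | cons w ws IH =>
    rw [List.foldl_cons]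
    rcases hst : pvStepAW (hm, cur) w with ⟨hm', cur'⟩
    rw [IH]
    unfold pvStepAW at hst
    dsimp only at hst
    split_ifs at hst with h1 h2 <;> injection hst with e1 e2 <;> subst e1 <;> subst e2
    · have hcw : cur.contains w = true := by simp only [Bool.and_eq_true] at h1; exact h1.2
      by_cases hkw : k = w
      · subst hkw; simp [hcw]
      · simp [List.mem_cons, hkw]
    · rw [PySem.Dict.contains_insert]
      by_cases hkw : k = w
      · subst hkw; simp
      · have hf : (k == w) = false := beq_eq_false_iff_ne.mpr hkw
        simp [List.mem_cons, hkw, hf]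
    · rw [PySem.Dict.contains_insert]
      by_cases hkw : k = w
      · subst hkw; simp
      · have hf : (k == w) = false := beq_eq_false_iff_ne.mpr hkw
        simp [List.mem_cons, hkw, hf]

lemma pvHm_contains (ws : List String) (hm cur : PySem.Dict String (List Int)) (k : String) :
    (ws.foldl pvStepAW (hm, cur)).1.contains k = (hm.contains k || decide (k ∈ ws)) := by
  induction ws generalizing hm cur with
  | nil => simp
  | cons w ws IH =>
    rw [List.foldl_cons]
    rcases hst : pvStepAW (hm, cur) w with ⟨hm', cur'⟩
    rw [IH]
    unfold pvStepAW at hst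
    dsimp only at hst
    split_ifs at hst with h1 h2 <;> injection hst with e1 e2 <;> subst e1 <;> subst e2
    · have hhw : hm.contains w = true := by simp only [Bool.and_eq_true] at h1; exact h1.1
      rw [PySem.Dict.contains_insert]
      by_cases hkw : k = w
      · subst hkw; simp [hhw]
      · have hf : (k == w) = false := beq_eq_false_iff_ne.mpr hkw
        simp [List.mem_cons, hkw, hf]
    · rw [PySem.Dict.contains_insert]
      by_cases hkw : k = w
      · subst hkw; simp
      · have hf : (k == w) = false := beq_eq_false_iff_ne.mpr hkw
        simp [List.mem_cons, hkw, hf]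
    · rw [PySem.Dict.contains_insert]
      by_cases hkw : k = w
      · subst hkw; simp
      · have hf : (k == w) = false := beq_eq_false_iff_ne.mpr hkw
        simp [List.mem_cons, hkw, hf]

lemma pvOfList_append (ws : List String) (w : String) :
    PySem.Set.ofList (ws ++ [w]) =
      if w ∈ ws then PySem.Set.ofList ws else PySem.Set.ofList ws ++ [w] := by
  have h1 : PySem.Set.ofList (ws ++ [w]) = PySem.Set.add (PySem.Set.ofList ws) w := by
    simp only [PySem.Set.ofList, List.foldl_append, List.foldl_cons, List.foldl_nil]
  have h2 : (PySem.Set.ofList ws).contains w = true ↔ w ∈ ws := by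
    rw [PySem.Set.contains_iff, PySem.Set.mem_ofList]
  rw [h1]
  unfold PySem.Set.add
  by_cases hmem : w ∈ ws
  · rw [if_pos (h2.2 hmem), if_pos hmem]
  · rw [if_neg (fun hc => hmem (h2.1 hc)), if_neg hmem]

-- reads at p.1 after a pvStepC update at p.1
lemma pvStepC_contains_self (cur h : PySem.Dict String (List Int)) (p : String × Int) :
    (pvStepC cur h p).contains p.1 = true := by
  unfold pvStepC pvStepB
  split_ifs <;> (rw [PySem.Dict.contains_insert]; simp)

-- merging one more occurrence of w equals merging the rest and then bumping the raw count once
lemma pvStepC_bump (cur H : PySem.Dict String (List Int)) (w : String) (c : Int) :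
    pvStepC cur H (w, c + 1) =
      (pvStepC cur H (w, c)).insert w
        [((pvStepC cur H (w, c)).getD w []).getD 0 0 + 1, ((pvStepC cur H (w, c)).getD w []).getD 1 0] := by
  unfold pvStepC pvStepB
  split_ifs <;> rw [PySem.Dict.getD_insert_self, PySem.Dict.insert_insert_self] <;> simp [add_assoc]

-- MAIN: A's token loop equals B's merge of the frequency table, generalized over the
-- already-current set
lemma pvMain (ws : List String) (hm cur : PySem.Dict String (List Int))
    (hsub : ∀ k, cur.contains k = true → hm.contains k = true) :
    (ws.foldl pvStepAW (hm, cur)).1 =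
      ((PySem.Set.ofList ws).map (fun k => (k, (ws.count k : Int)))).foldl (pvStepC cur) hm := by
  induction ws using List.reverseRecOn with
  | nil => rfl
  | append_singleton ws w IH =>
    rw [List.foldl_append, List.foldl_cons, List.foldl_nil, pvOfList_append]
    by_cases hmem : w ∈ ws
    · rw [if_pos hmem]
      have hwof : w ∈ PySem.Set.ofList ws := (PySem.Set.mem_ofList _ _).2 hmem
      obtain ⟨P, S, hPS⟩ := List.append_of_mem hwof
      have hnd : (PySem.Set.ofList ws).Nodup := PySem.Set.nodup_ofList ws
      rw [hPS] at hnd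
      have hPw : ∀ x ∈ P, x ≠ w := by
        intro x hx hxe; subst hxe
        exact (List.disjoint_of_nodup_append hnd) hx (List.mem_cons_self)
      have hSw : ∀ x ∈ S, x ≠ w := by
        intro x hx hxe; subst hxe
        exact (List.nodup_cons.mp (List.Nodup.of_append_right hnd)).1 hx
      have hcw : ∀ k, k ≠ w → ((ws ++ [w]).count k : Int) = (ws.count k : Int) := by
        intro k hk; norm_cast; simp [List.count_append, Ne.symm hk]
      rw [hPS, List.map_append, List.map_cons, List.foldl_append, List.foldl_cons]
      have hP' : P.map (fun k => (k, ((ws ++ [w]).count k : Int)))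
          = P.map (fun k => (k, (ws.count k : Int))) :=
        List.map_congr_left (fun x hx => by rw [hcw x (hPw x hx)])
      have hS' : S.map (fun k => (k, ((ws ++ [w]).count k : Int)))
          = S.map (fun k => (k, (ws.count k : Int))) :=
        List.map_congr_left (fun x hx => by rw [hcw x (hSw x hx)])
      have hcww : ((ws ++ [w]).count w : Int) = (ws.count w : Int) + 1 := by
        norm_cast; simp [List.count_append]
      rw [hP', hS', hcww]
      set H := (P.map (fun k => (k, (ws.count k : Int)))).foldl (pvStepC cur) hm with hH
      rw [pvStepC_bump]
      set X := pvStepC cur H (w, (ws.count w : Int)) with hX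
      have hSkeys : ∀ p ∈ S.map (fun k => (k, (ws.count k : Int))), p.1 ≠ w := by
        intro p hp
        obtain ⟨x, hx, rfl⟩ := List.mem_map.mp hp
        exact hSw x hx
      rw [pvFold_insert_comm cur _ hSkeys X _ (pvStepC_contains_self cur H (w, _))]
      have hc2 : (ws.foldl pvStepAW (hm, cur)).2.contains w = true := by
        rw [pvCur_contains]; simp [hmem]
      have hc1 : (ws.foldl pvStepAW (hm, cur)).1.contains w = true := by
        rw [pvHm_contains]; simp [hmem]
      have hA1 : (ws.foldl pvStepAW (hm, cur)).1
          = (S.map (fun k => (k, (ws.count k : Int)))).foldl (pvStepC cur) X := by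
        rw [IH, hPS, List.map_append, List.map_cons, List.foldl_append, List.foldl_cons]
      rcases hA : ws.foldl pvStepAW (hm, cur) with ⟨hm1, cur1⟩
      rw [hA] at hA1 hc1 hc2
      dsimp only at hA1 hc1 hc2
      unfold pvStepAW
      dsimp only
      rw [if_pos (by rw [hc1, hc2]; rfl)]
      dsimp only
      rw [hA1, pvFold_getD cur _ hSkeys X]
    · rw [if_neg hmem, List.map_append, List.map_cons, List.map_nil,
          List.foldl_append, List.foldl_cons, List.foldl_nil]
      have hmap : (PySem.Set.ofList ws).map (fun k => (k, ((ws ++ [w]).count k : Int)))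
          = (PySem.Set.ofList ws).map (fun k => (k, (ws.count k : Int))) := by
        apply List.map_congr_left
        intro x hx
        have hxw : x ≠ w := by
          intro h; subst h; exact hmem ((PySem.Set.mem_ofList _ _).1 hx)
        simp [List.count_append, Ne.symm hxw]
      rw [hmap, ← IH]
      have hcnt : ((ws ++ [w]).count w : Int) = 1 := by
        simp [List.count_append, List.count_eq_zero.mpr hmem]
      rw [hcnt]
      have hc2' := pvCur_contains ws hm cur w
      have hc1' := pvHm_contains ws hm cur w
      rcases hA : ws.foldl pvStepAW (hm, cur) with ⟨hm1, cur1⟩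
      rw [hA] at hc2' hc1'
      dsimp only at hc2' hc1'
      rw [show decide (w ∈ ws) = false by simp [hmem], Bool.or_false] at hc2' hc1'
      unfold pvStepAW pvStepC pvStepB
      dsimp only
      by_cases hcw : cur.contains w = true
      · have hhw : hm.contains w = true := hsub w hcw
        rw [if_pos (by rw [hc1', hc2', hhw, hcw]; rfl), if_pos hcw]
      · rw [if_neg (by rw [hc1', hc2']; simp [hcw]), if_neg hcw]
        by_cases hhw : hm.contains w = true
        · rw [if_pos (by rw [hc1']; exact hhw), if_pos (by rw [hc1']; exact hhw)]
        · rw [if_neg (by rw [hc1']; simp [hhw]), if_neg (by rw [hc1']; simp [hhw])]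

-- ===== VERDICT (by name: the statement is the Claim_ definition above) =====
theorem map_book_new_spec : Claim_equal_map_book_new := by
  intro hash_map tokens _ _
  unfold Spec_map_book_new
  cases tokens with
  | none => rfl
  | some ts =>
    simp only [map_book_new, map_book_new_alt]
    rw [PySem.Dict.foldl_insert_getD_add_one_eq_counter]
    rw [PySem.Dict.items_counter]
    have hfold : ts.foldl pvStepA (PySem.Dict.mk hash_map, (PySem.Dict.empty : PySem.Dict String (List Int)))
        = (ts.map pvClean).foldl pvStepAW (PySem.Dict.mk hash_map, PySem.Dict.empty) := by
      rw [List.foldl_map]; rfl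
    rw [hfold]
    rw [pvMain _ _ _ (fun k hk => by simp [PySem.Dict.contains_empty] at hk)]
    rw [pvStepC_empty]
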